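-- pv_equiv track=rewrite | github.com/Ankit-Arya/new-venture-backend | multiprocessing_duty_generator.py | chunk_indices
-- ===== SOURCE A (Python) =====
-- def chunk_indices(total, chunk_spans):
--     ranges = []
--     start = 0
--     for span in chunk_spans:
--         end = min(start + span, total)
--         ranges.append((start, end))
--         start = end
--         if start >= total:
--             break
--     if start < total:
--         ranges.append((start, total))
--     return ranges
-- ===== SOURCE B (Python) =====
-- def chunk_indices(total, chunk_spans):
--     # Stage 1: unclamped prefix sums of the spans.
--     prefixes = [0]
--     for s in chunk_spans:
--         prefixes.append(prefixes[-1] + s)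
--     # Stage 2: locate the first prefix that reaches total (the crossing point).
--     cut = next((i for i in range(1, len(prefixes)) if prefixes[i] >= total), None)
--     if cut is not None:
--         bounds = prefixes[:cut] + [total]
--     elif prefixes[-1] < total:
--         bounds = prefixes + [total]
--     else:
--         bounds = prefixes
--     # Stage 3: pair consecutive boundaries.
--     return list(zip(bounds, bounds[1:]))
-- ===== Notes on version B (the rewrite author's own statement) =====
-- stated objective: alternative
-- what changed: B replaces A's single clamped running loop (min-clip each step, early break) with three stages: it computes the unclamped prefix sums of the spans, searches for the first prefix that reaches total to cut the list there, and finally zips consecutive boundaries into ranges.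
import Mathlib
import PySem

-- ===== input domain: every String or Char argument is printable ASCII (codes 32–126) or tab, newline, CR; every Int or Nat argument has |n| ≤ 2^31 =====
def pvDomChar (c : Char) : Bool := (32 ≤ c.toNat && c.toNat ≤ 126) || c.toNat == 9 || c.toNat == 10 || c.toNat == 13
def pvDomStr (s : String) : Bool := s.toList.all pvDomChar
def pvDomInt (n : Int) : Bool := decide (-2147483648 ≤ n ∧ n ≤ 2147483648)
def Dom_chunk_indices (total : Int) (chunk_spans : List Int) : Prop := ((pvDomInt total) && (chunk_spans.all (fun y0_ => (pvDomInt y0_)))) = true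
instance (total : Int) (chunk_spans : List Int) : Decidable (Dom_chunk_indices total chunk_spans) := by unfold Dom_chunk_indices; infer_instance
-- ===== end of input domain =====

-- B replaces A's clamped running loop with three stages: unclamped prefix sums, a search
-- for the first prefix reaching total, and pairing of consecutive boundaries (alternative
-- decomposition, same cost).

-- ===== PORT A =====
-- the for-loop of A, carrying (ranges, start); the early 'break' is the non-recursive branch
def chunkA_loop (total : Int) (spans : List Int) (ranges : List (Int × Int)) (start : Int) :
    List (Int × Int) × Int :=
  match spans with
  | [] => (ranges, start)
  | span :: rest =>
    let e := min (start + span) total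
    let ranges' := ranges ++ [(start, e)]
    if e ≥ total then (ranges', e) else chunkA_loop total rest ranges' e

def chunk_indices (total : Int) (chunk_spans : List Int) : List (Int × Int) :=
  let r := chunkA_loop total chunk_spans [] 0
  if r.2 < total then r.1 ++ [(r.2, total)] else r.1

-- ===== PORT B =====
-- 'next((i for i in range(1, len(prefixes)) if prefixes[i] >= total), None)' is ported with
-- List.range' 1 (len-1) (= range(1, len)) and find?; the indices produced are in range, so
-- getD is exact for prefixes[i].
def chunk_indices_alt (total : Int) (chunk_spans : List Int) : List (Int × Int) :=
  let prefixes := chunk_spans.foldl (fun acc s => acc ++ [acc.getLast! + s]) [0]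
  let cut := (List.range' 1 (prefixes.length - 1)).find? (fun i => decide (prefixes.getD i 0 ≥ total))
  let bounds :=
    match cut with
    | some i => prefixes.take i ++ [total]
    | none => if prefixes.getLast! < total then prefixes ++ [total] else prefixes
  bounds.zip bounds.tail

-- ===== PRECONDITION & SPEC =====
def Spec_chunk_indices (total : Int) (chunk_spans : List Int) (out : List (Int × Int)) : Prop := out = chunk_indices_alt total chunk_spans
instance (total : Int) (chunk_spans : List Int) (out : List (Int × Int)) : Decidable (Spec_chunk_indices total chunk_spans out) := by unfold Spec_chunk_indices; infer_instance

-- ===== CLAIM (what is proved, stated in full; the proofs are below) =====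
def Claim_equal_chunk_indices : Prop := ∀ (total : Int) (chunk_spans : List Int), Dom_chunk_indices total chunk_spans → Spec_chunk_indices total chunk_spans (chunk_indices total chunk_spans)

-- ===== LEMMAS AND PROOFS =====

-- common specification both sides are reduced to
def spec (total c : Int) (spans : List Int) : List (Int × Int) :=
  match spans with
  | [] => if c < total then [(c, total)] else []
  | s :: r => if c + s ≥ total then [(c, total)] else (c, c + s) :: spec total (c + s) r

-- the pure (unclamped) prefix sums of spans starting from c
def prefs (c : Int) (spans : List Int) : List Int :=
  match spans with
  | [] => []
  | s :: r => (c + s) :: prefs (c + s) r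

-- spec expressed over the prefix list
def specL (total c : Int) (q : List Int) : List (Int × Int) :=
  match q with
  | [] => if c < total then [(c, total)] else []
  | p :: r => if p ≥ total then [(c, total)] else (c, p) :: specL total p r

lemma getLast!_concat (bs : List Int) (c : Int) : (bs ++ [c]).getLast! = c := by
  induction bs with
  | nil => rfl
  | cons x xs ih =>
    cases xs with
    | nil => rfl
    | cons y ys => simpa using ih

lemma foldl_prefs (spans : List Int) :
    ∀ acc : List Int,
      spans.foldl (fun acc s => acc ++ [acc.getLast! + s]) acc
        = acc ++ prefs acc.getLast! spans := by
  induction spans with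
  | nil => intro acc; simp [prefs]
  | cons s r ih =>
    intro acc
    simp only [List.foldl_cons, prefs, ih, getLast!_concat]
    simp

lemma aloop_spec (total : Int) (spans : List Int) :
    ∀ (ranges : List (Int × Int)) (start : Int),
      (let r := chunkA_loop total spans ranges start;
       if r.2 < total then r.1 ++ [(r.2, total)] else r.1)
        = ranges ++ spec total start spans := by
  induction spans with
  | nil =>
    intro ranges start
    simp only [chunkA_loop, spec]
    split <;> simp_all
  | cons s rest ih =>
    intro ranges start
    simp only [chunkA_loop, spec]
    by_cases h : start + s ≥ total
    · have he : min (start + s) total = total := by omega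
      simp [h]
    · have he : min (start + s) total = start + s := by omega
      have := ih (ranges ++ [(start, start + s)]) (start + s)
      simp only [he, ge_iff_le, if_neg (by omega : ¬ total ≤ start + s)] at *
      simp [this]

lemma spec_specL (total : Int) (spans : List Int) :
    ∀ c : Int, spec total c spans = specL total c (prefs c spans) := by
  induction spans with
  | nil => intro c; rfl
  | cons s r ih => intro c; simp [spec, prefs, specL, ih]

lemma findIdx_range (total : Int) (q : List Int) :
    ∀ c : Int,
      (List.range' 1 q.length).find? (fun i => decide ((c :: q).getD i 0 ≥ total))
        = (q.findIdx? (fun v => decide (v ≥ total))).map (· + 1) := by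
  induction q with
  | nil => intro c; simp
  | cons p r ih =>
    intro c
    simp only [List.length_cons]
    rw [List.range'_succ]
    simp only [List.find?_cons, List.findIdx?_cons]
    by_cases h : p ≥ total
    · simp [h]
    · simp only [h, decide_false, List.getD_cons_succ, List.getD_cons_zero]
      rw [show List.range' 2 r.length = (List.range' 1 r.length).map (· + 1) by
            rw [List.range'_eq_map_range, List.range'_eq_map_range, List.map_map]
            exact List.map_congr_left fun i _ => by
              simp only [Function.comp_apply]; omega]
      rw [List.find?_map]
      have := ih p
      simp only [Function.comp_def] at *
      rw [show (fun i => decide ((c :: p :: r).getD (i + 1) 0 ≥ total))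
            = (fun i => decide ((p :: r).getD i 0 ≥ total)) by funext i; simp]
      rw [this]
      cases r.findIdx? (fun v => decide (v ≥ total)) <;> simp

lemma zipB (total : Int) (q : List Int) :
    ∀ c : Int,
      (let cut := (q.findIdx? (fun v => decide (v ≥ total))).map (· + 1)
       let bounds :=
         match cut with
         | some i => (c :: q).take i ++ [total]
         | none => if (c :: q).getLast! < total then (c :: q) ++ [total] else (c :: q)
       bounds.zip bounds.tail) = specL total c q := by
  induction q with
  | nil =>
    intro c
    simp only [List.findIdx?_nil, Option.map_none, specL]
    split <;> simp_all [List.getLast!]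
  | cons p r ih =>
    intro c
    simp only [List.findIdx?_cons, specL]
    by_cases h : p ≥ total
    · simp [h, List.zip]
    · have hb := ih p
      simp only [h, decide_false, Bool.false_eq_true, if_false] at hb ⊢
      cases hfi : r.findIdx? (fun v => decide (v ≥ total)) with
      | some j =>
        simp only [hfi, Option.map_some, List.take_succ_cons, List.cons_append,
          List.zip_cons_cons, List.tail_cons] at hb ⊢
        rw [← hb]
      | none =>
        simp only [hfi, Option.map_none] at hb ⊢
        have hlast : (c :: p :: r).getLast! = (p :: r).getLast! := by
          simp [List.getLast!]
        rw [hlast]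
        by_cases hc : (p :: r).getLast! < total
        · simp only [if_pos hc, List.cons_append, List.zip_cons_cons, List.tail_cons] at hb ⊢
          rw [← hb]
        · simp only [if_neg hc, List.zip_cons_cons, List.tail_cons] at hb ⊢
          rw [← hb]

-- ===== VERDICT (by name: the statement is the Claim_ definition above) =====
theorem chunk_indices_spec : Claim_equal_chunk_indices := by
  intro total chunk_spans _
  unfold Spec_chunk_indices chunk_indices chunk_indices_alt
  have hp : chunk_spans.foldl (fun acc s => acc ++ [acc.getLast! + s]) [0]
      = 0 :: prefs 0 chunk_spans := by
    simpa using foldl_prefs chunk_spans [0]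
  rw [aloop_spec]
  simp only [hp, List.length_cons, Nat.add_sub_cancel]
  rw [findIdx_range total (prefs 0 chunk_spans) 0]
  rw [zipB total (prefs 0 chunk_spans) 0]
  rw [spec_specL]
  simp
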